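-- pv_equiv track=rewrite | github.com/hl-kim-mz/gran-maestro | scripts/mst.py | _compute_fact_check_summary
-- ===== SOURCE A (Python) =====
-- def _compute_fact_check_summary(claims):
--     summary = {"total": 0, "verified": 0, "failed": 0, "unverified": 0}
--     if not isinstance(claims, list):
--         return summary
--
--     for claim in claims:
--         if not isinstance(claim, dict):
--             continue
--         status = str(claim.get("status", "unverified")).strip().lower()
--         if status == "verified":
--             summary["verified"] += 1
--         elif status == "failed":
--             summary["failed"] += 1
--         else:
--             summary["unverified"] += 1
--     summary["total"] = summary["verified"] + summary["failed"] + summary["unverified"]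
--     return summary
-- ===== SOURCE B (Python) =====
-- def _compute_fact_check_summary(claims):
--     if not isinstance(claims, list):
--         return {"total": 0, "verified": 0, "failed": 0, "unverified": 0}
--     statuses = [str(claim.get("status", "unverified")).strip().lower()
--                 for claim in claims if isinstance(claim, dict)]
--     total = len(statuses)
--     verified = statuses.count("verified")
--     failed = statuses.count("failed")
--     return {"total": total, "verified": verified, "failed": failed,
--             "unverified": total - verified - failed}
-- ===== Notes on version B (the rewrite author's own statement) =====
-- stated objective: simpler
-- what changed: Replaces the per-claim if/elif/else branching with in-place dict increments by one pass that materializes the normalized status list and then derives the summary arithmetically: verified/failed via list.count and unverified as the residual total - verified - failed.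
import Mathlib
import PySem

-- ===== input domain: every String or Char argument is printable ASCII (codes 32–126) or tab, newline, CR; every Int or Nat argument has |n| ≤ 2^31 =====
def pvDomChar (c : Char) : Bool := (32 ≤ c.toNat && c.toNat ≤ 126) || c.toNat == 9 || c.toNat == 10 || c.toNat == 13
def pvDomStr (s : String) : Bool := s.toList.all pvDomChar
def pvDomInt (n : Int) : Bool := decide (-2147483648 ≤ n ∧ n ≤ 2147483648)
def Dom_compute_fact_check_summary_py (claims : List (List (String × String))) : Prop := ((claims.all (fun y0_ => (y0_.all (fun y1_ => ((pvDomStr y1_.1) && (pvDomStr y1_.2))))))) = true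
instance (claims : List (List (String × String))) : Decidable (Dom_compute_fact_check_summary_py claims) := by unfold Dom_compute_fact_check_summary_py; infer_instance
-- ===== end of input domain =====

-- B replaces A's per-claim if/elif/else dict increments by building the normalized
-- status list once and deriving the summary arithmetically (unverified as residual);
-- objective: simpler.


-- shared helper: str(claim.get("status", "unverified")).strip().lower()
-- (this exact expression occurs in both Pythons; str() on a str is the identity)
def pvStatusOf (claim : List (String × String)) : String :=
  PySem.Str.lower (PySem.Str.strip (PySem.Dict.getD (PySem.Dict.mk claim) "status" "unverified"))

-- ===== PORT A =====
-- literal transliteration of A: summary dict, per-claim if/elif/else increments,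
-- then summary["total"] = verified + failed + unverified
def compute_fact_check_summary_py (claims : List (List (String × String))) : List (String × Int) :=
  let summary0 : PySem.Dict String Int :=
    PySem.Dict.mk [("total", 0), ("verified", 0), ("failed", 0), ("unverified", 0)]
  let summary := claims.foldl (fun summary claim =>
    let status := pvStatusOf claim
    if status = "verified" then summary.modify "verified" 0 (· + 1)
    else if status = "failed" then summary.modify "failed" 0 (· + 1)
    else summary.modify "unverified" 0 (· + 1)) summary0
  (summary.insert "total"
    (summary.getD "verified" 0 + summary.getD "failed" 0 + summary.getD "unverified" 0)).items

-- ===== PORT B =====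
-- transliteration of Source B: normalized status list, then counts and the residual
def compute_fact_check_summary_py_alt (claims : List (List (String × String))) : List (String × Int) :=
  let statuses := claims.map pvStatusOf
  let total : Int := statuses.length
  let verified : Int := statuses.count "verified"
  let failed : Int := statuses.count "failed"
  [("total", total), ("verified", verified), ("failed", failed),
   ("unverified", total - verified - failed)]

-- ===== PRECONDITION & SPEC =====
def Spec_compute_fact_check_summary_py (claims : List (List (String × String))) (out : List (String × Int)) : Prop := out = compute_fact_check_summary_py_alt claims
instance (claims : List (List (String × String))) (out : List (String × Int)) : Decidable (Spec_compute_fact_check_summary_py claims out) := by unfold Spec_compute_fact_check_summary_py; infer_instance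

-- ===== CLAIM (what is proved, stated in full; the proofs are below) =====
def Claim_equal_compute_fact_check_summary_py : Prop := ∀ (claims : List (List (String × String))), Dom_compute_fact_check_summary_py claims → Spec_compute_fact_check_summary_py claims (compute_fact_check_summary_py claims)

-- ===== LEMMAS AND PROOFS =====

-- invariant of A's loop: the summary dict tracks the status counts of the prefix
lemma pv_loopA (claims : List (List (String × String))) (t v f u : Int) :
    claims.foldl (fun summary claim =>
      let status := pvStatusOf claim
      if status = "verified" then summary.modify "verified" 0 (· + 1)
      else if status = "failed" then summary.modify "failed" 0 (· + 1)
      else summary.modify "unverified" 0 (· + 1))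
      (PySem.Dict.mk [("total", t), ("verified", v), ("failed", f), ("unverified", u)]) =
    PySem.Dict.mk [("total", t),
      ("verified", v + ((claims.map pvStatusOf).count "verified" : Int)),
      ("failed", f + ((claims.map pvStatusOf).count "failed" : Int)),
      ("unverified", u + ((claims.length : Int)
        - ((claims.map pvStatusOf).count "verified" : Int)
        - ((claims.map pvStatusOf).count "failed" : Int)))] := by
  induction claims generalizing t v f u with
  | nil => simp
  | cons c cs ih =>
    simp only [List.foldl_cons, List.map_cons, List.length_cons]
    by_cases h1 : pvStatusOf c = "verified"
    · rw [if_pos h1]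
      rw [show (PySem.Dict.mk [("total", t), ("verified", v), ("failed", f), ("unverified", u)]).modify "verified" 0 (· + 1) =
          PySem.Dict.mk [("total", t), ("verified", v + 1), ("failed", f), ("unverified", u)] by
        simp [PySem.Dict.modify, PySem.Dict.contains, PySem.Dict.get?, PySem.Dict.getD, PySem.Dict.insert]]
      rw [ih]
      simp [h1]
      omega
    · rw [if_neg h1]
      by_cases h2 : pvStatusOf c = "failed"
      · rw [if_pos h2]
        rw [show (PySem.Dict.mk [("total", t), ("verified", v), ("failed", f), ("unverified", u)]).modify "failed" 0 (· + 1) =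
            PySem.Dict.mk [("total", t), ("verified", v), ("failed", f + 1), ("unverified", u)] by
          simp [PySem.Dict.modify, PySem.Dict.contains, PySem.Dict.get?, PySem.Dict.getD, PySem.Dict.insert]]
        rw [ih]
        simp [h2]
        omega
      · rw [if_neg h2]
        rw [show (PySem.Dict.mk [("total", t), ("verified", v), ("failed", f), ("unverified", u)]).modify "unverified" 0 (· + 1) =
            PySem.Dict.mk [("total", t), ("verified", v), ("failed", f), ("unverified", u + 1)] by
          simp [PySem.Dict.modify, PySem.Dict.contains, PySem.Dict.get?, PySem.Dict.getD, PySem.Dict.insert]]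
        rw [ih]
        simp [h1, h2]
        omega

-- ===== VERDICT (by name: the statement is the Claim_ definition above) =====
theorem compute_fact_check_summary_py_spec : Claim_equal_compute_fact_check_summary_py := by
  intro claims _
  unfold Spec_compute_fact_check_summary_py
  simp only [compute_fact_check_summary_py, compute_fact_check_summary_py_alt]
  rw [pv_loopA]
  simp [PySem.Dict.insert, PySem.Dict.contains, PySem.Dict.getD, PySem.Dict.get?]
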